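-- pv_equiv track=rewrite | github.com/toriwei/nwslink | driver/sandbox_guess.py | get_dynamic_grid
-- ===== SOURCE A (Python) =====
-- def get_dynamic_grid(players, guess_progress):
--   dynamic_grid = []
--   for i, row in enumerate(players):
--     row_arr = []
--     for j, player in enumerate(row):
--       if j != 3:
--         row_arr.append(player)
--       else:
--         row_arr.append(guess_progress[i])
--     dynamic_grid.append(row_arr)
--   return dynamic_grid
-- ===== SOURCE B (Python) =====
-- def get_dynamic_grid(players, guess_progress):
--   return [
--     row[:3] + [guess_progress[i]] + row[4:] if len(row) > 3 else list(row)
--     for i, row in enumerate(players)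
--   ]
-- ===== Notes on version B (the rewrite author's own statement) =====
-- stated objective: simpler
-- what changed: Replaces the element-wise enumerate/conditional-append inner loop with a single comprehension that builds each row by slicing (row[:3] + [guess_progress[i]] + row[4:]) when the row is long enough, else a plain copy.
import Mathlib
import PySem

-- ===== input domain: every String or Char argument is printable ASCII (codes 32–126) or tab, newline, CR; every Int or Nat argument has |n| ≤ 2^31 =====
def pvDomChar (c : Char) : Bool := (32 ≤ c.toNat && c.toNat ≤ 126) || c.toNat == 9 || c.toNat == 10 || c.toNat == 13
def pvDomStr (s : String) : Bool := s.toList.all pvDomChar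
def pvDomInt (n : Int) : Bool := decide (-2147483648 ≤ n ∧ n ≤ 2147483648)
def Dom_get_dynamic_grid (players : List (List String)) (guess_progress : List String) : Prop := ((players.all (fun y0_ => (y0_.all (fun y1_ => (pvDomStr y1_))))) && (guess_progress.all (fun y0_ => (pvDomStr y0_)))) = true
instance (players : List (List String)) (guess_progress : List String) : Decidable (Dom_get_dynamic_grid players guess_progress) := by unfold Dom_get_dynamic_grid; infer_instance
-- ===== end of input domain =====

-- B replaces the element-wise inner loop by slice-based row construction (simpler decomposition; same cost).

-- ===== PORT A =====
-- 'guess_progress[i]' is pyGetD with a dummy default; Pre_ excludes the out-of-range (IndexError) inputs.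
def get_dynamic_grid (players : List (List String)) (guess_progress : List String) : List (List String) :=
  (PySem.List.enumerate players).foldl (fun dynamic_grid p =>
    dynamic_grid ++ [(PySem.List.enumerate p.2).foldl (fun row_arr q =>
      if q.1 ≠ 3 then row_arr ++ [q.2]
      else row_arr ++ [PySem.List.pyGetD guess_progress p.1 ""]) []]) []

-- ===== PORT B =====
def get_dynamic_grid_alt (players : List (List String)) (guess_progress : List String) : List (List String) :=
  (PySem.List.enumerate players).map (fun p =>
    if 3 < p.2.length then
      PySem.List.slice p.2 none (some 3) ++ [PySem.List.pyGetD guess_progress p.1 ""] ++ PySem.List.slice p.2 (some 4) none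
    else p.2)

-- ===== PRECONDITION & SPEC =====
-- Pre_ excludes exactly the inputs where guess_progress[i] raises IndexError in Python
-- (a row with more than 3 entries at an index i ≥ len(guess_progress)); both A and B raise there.
def Pre_get_dynamic_grid (players : List (List String)) (guess_progress : List String) : Prop :=
  ∀ p ∈ PySem.List.enumerate players, 3 < p.2.length → PySem.Raise.InRange guess_progress.length p.1
instance (players : List (List String)) (guess_progress : List String) : Decidable (Pre_get_dynamic_grid players guess_progress) := by unfold Pre_get_dynamic_grid; infer_instance

def pvWitness_get_dynamic_grid : List (List String) × List String :=
  ([["a", "b", "c", "d", "e"], ["x"]], ["G1", "G2"])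

def Spec_get_dynamic_grid (players : List (List String)) (guess_progress : List String) (out : List (List String)) : Prop := out = get_dynamic_grid_alt players guess_progress
instance (players : List (List String)) (guess_progress : List String) (out : List (List String)) : Decidable (Spec_get_dynamic_grid players guess_progress out) := by unfold Spec_get_dynamic_grid; infer_instance

-- ===== CLAIM (what is proved, stated in full; the proofs are below) =====
def Claim_equal_get_dynamic_grid : Prop := ∀ (players : List (List String)) (guess_progress : List String), Dom_get_dynamic_grid players guess_progress → Pre_get_dynamic_grid players guess_progress → Spec_get_dynamic_grid players guess_progress (get_dynamic_grid players guess_progress)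

-- ===== LEMMAS AND PROOFS =====

-- indices past 3 never hit the replacement branch
theorem pv_map_enum_high {g : String} (rest : List String) (s : Int) (hs : 3 < s) :
    (PySem.List.enumerate rest s).map (fun q => if q.1 ≠ 3 then q.2 else g) = rest := by
  induction rest generalizing s with
  | nil => simp [PySem.List.enumerate_nil]
  | cons a t ih =>
      have : (s : Int) ≠ 3 := by omega
      simpa [PySem.List.enumerate_cons, this] using ih (s + 1) (by omega)

-- the inner loop of A, per row, equals B's slice construction
theorem pv_row_eq (row : List String) (g : String) :
    (PySem.List.enumerate row).map (fun q => if q.1 ≠ 3 then q.2 else g) =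
      if 3 < row.length then row.take 3 ++ g :: row.drop 4 else row := by
  match row with
  | [] => simp [PySem.List.enumerate_nil]
  | [a] => simp [PySem.List.enumerate]
  | [a, b] => simp [PySem.List.enumerate]
  | [a, b, c] => simp [PySem.List.enumerate]
  | a :: b :: c :: d :: rest =>
      have h := pv_map_enum_high (g := g) rest 4 (by omega)
      simp [PySem.List.enumerate_cons] at h ⊢
      simpa using h

-- ===== VERDICT (by name: the statement is the Claim_ definition above) =====
theorem get_dynamic_grid_spec : Claim_equal_get_dynamic_grid := by
  intro players guess_progress _ _
  unfold Spec_get_dynamic_grid get_dynamic_grid get_dynamic_grid_alt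
  rw [PySem.List.foldl_append_singleton_eq_map]
  simp only [List.nil_append]
  refine List.map_congr_left (fun p _ => ?_)
  have hb : (fun (row_arr : List String) (q : Int × String) =>
      if q.1 ≠ 3 then row_arr ++ [q.2]
      else row_arr ++ [PySem.List.pyGetD guess_progress p.1 ""]) =
      fun row_arr q => row_arr ++ [if q.1 ≠ 3 then q.2 else PySem.List.pyGetD guess_progress p.1 ""] := by
    funext row_arr q; split <;> rfl
  rw [hb, PySem.List.foldl_append_singleton_eq_map]
  simp only [List.nil_append]
  have := pv_row_eq p.2 (PySem.List.pyGetD guess_progress p.1 "")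
  simp only [this]
  split
  · have h1 : PySem.List.slice p.2 none (some 3) = p.2.take 3 := by
      rw [PySem.List.slice_to (xs := p.2) (b := 3) (by omega)]; rfl
    have h2 : PySem.List.slice p.2 (some 4) none = p.2.drop 4 := by
      rw [PySem.List.slice_from (xs := p.2) (a := 4) (by omega)]; rfl
    rw [h1, h2]; simp
  · rfl
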